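-- pv_equiv track=rewrite | github.com/brianlorenz/PhD_Research | uncover_code/fit_emission_uncover_main_before_offsetchange.py | extend_mask
-- ===== SOURCE A (Python) =====
-- def extend_mask(mask1):
--     mask2 = []
--     for i in range(len(mask1)):
--         if i == 0 or i == len(mask1)-1:
--             mask2.append(True)
--         elif mask1[i-1] == False:
--             mask2.append(False)
--         elif mask1[i+1] == False:
--             mask2.append(False)
--         elif mask1[i] == False:
--             mask2.append(False)
--         else:
--             mask2.append(True)
--     return mask2
-- ===== SOURCE B (Python) =====
-- def extend_mask(mask1):
--     n = len(mask1)
--     if n == 0: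
--         return []
--     mask2 = [True] * n
--     for j in range(n):
--         if mask1[j] == False:
--             if j - 1 >= 0:
--                 mask2[j - 1] = False
--             mask2[j] = False
--             if j + 1 < n:
--                 mask2[j + 1] = False
--     mask2[0] = True
--     mask2[n - 1] = True
--     return mask2
-- ===== Notes on version B (the rewrite author's own statement) =====
-- stated objective: alternative
-- what changed: Replaces A's gather (each output index queries its three neighbors in a branch chain) by a scatter/dilation: start from an all-True array, and each False element writes False to itself and to both in-bounds neighbors, then the two endpoints are forced True.
import Mathlib
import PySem

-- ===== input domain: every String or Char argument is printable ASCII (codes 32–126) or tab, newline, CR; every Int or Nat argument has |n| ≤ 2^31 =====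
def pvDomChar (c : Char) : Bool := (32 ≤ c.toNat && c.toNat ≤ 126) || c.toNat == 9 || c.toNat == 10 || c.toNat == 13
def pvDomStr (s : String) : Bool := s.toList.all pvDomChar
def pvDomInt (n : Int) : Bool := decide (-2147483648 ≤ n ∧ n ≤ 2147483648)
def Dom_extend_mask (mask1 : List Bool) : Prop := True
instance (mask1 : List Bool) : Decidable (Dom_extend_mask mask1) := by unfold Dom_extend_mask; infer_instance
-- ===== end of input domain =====

-- B replaces A's gather (each output index queries its three neighbors) by a
-- scatter/dilation: start all-True, each False element writes False onto itself and its
-- in-bounds neighbors, then both endpoints are forced True (objective: alternative).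

-- ===== PORT A =====
def extend_mask (mask1 : List Bool) : List Bool :=
  (PySem.List.pyRange 0 (mask1.length : Int) 1).foldl (fun mask2 i =>
    if i = 0 ∨ i = (mask1.length : Int) - 1 then mask2 ++ [true]
    else if PySem.List.pyGet? mask1 (i - 1) = some false then mask2 ++ [false]
    else if PySem.List.pyGet? mask1 (i + 1) = some false then mask2 ++ [false]
    else if PySem.List.pyGet? mask1 i = some false then mask2 ++ [false]
    else mask2 ++ [true]) []

-- ===== PORT B =====
-- loop body of Source B: a False at index j clears j-1 (if in bounds), j, and j+1 (if in bounds)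
def pvStep (mask1 : List Bool) (n : Nat) (acc : List Bool) (j : Nat) : List Bool :=
  if mask1.getD j true = false then
    if j + 1 < n then ((if 1 ≤ j then acc.set (j - 1) false else acc).set j false).set (j + 1) false
    else (if 1 ≤ j then acc.set (j - 1) false else acc).set j false
  else acc

def extend_mask_alt (mask1 : List Bool) : List Bool :=
  let n := mask1.length
  if n = 0 then []
  else
    let m := (List.range n).foldl (pvStep mask1 n) (List.replicate n true)
    (m.set 0 true).set (n - 1) true

-- ===== PRECONDITION & SPEC =====
def Spec_extend_mask (mask1 : List Bool) (out : List Bool) : Prop := out = extend_mask_alt mask1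
instance (mask1 : List Bool) (out : List Bool) : Decidable (Spec_extend_mask mask1 out) := by unfold Spec_extend_mask; infer_instance

-- ===== CLAIM (what is proved, stated in full; the proofs are below) =====
def Claim_equal_extend_mask : Prop := ∀ (mask1 : List Bool), Dom_extend_mask mask1 → Spec_extend_mask mask1 (extend_mask mask1)

-- ===== LEMMAS AND PROOFS =====

-- the per-index value A appends
def pvG (mask1 : List Bool) (i : Int) : Bool :=
  if i = 0 ∨ i = (mask1.length : Int) - 1 then true
  else if PySem.List.pyGet? mask1 (i - 1) = some false then false
  else if PySem.List.pyGet? mask1 (i + 1) = some false then false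
  else if PySem.List.pyGet? mask1 i = some false then false
  else true

theorem extend_mask_eq_map (mask1 : List Bool) :
    extend_mask mask1 = (List.range mask1.length).map (fun k : Nat => pvG mask1 (((k : Nat) : Int))) := by
  unfold extend_mask
  have hfun : (fun (mask2 : List Bool) (i : Int) =>
      if i = 0 ∨ i = (mask1.length : Int) - 1 then mask2 ++ [true]
      else if PySem.List.pyGet? mask1 (i - 1) = some false then mask2 ++ [false]
      else if PySem.List.pyGet? mask1 (i + 1) = some false then mask2 ++ [false]
      else if PySem.List.pyGet? mask1 i = some false then mask2 ++ [false]
      else mask2 ++ [true]) = (fun mask2 i => mask2 ++ [pvG mask1 i]) := by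
    funext mask2 i
    unfold pvG
    split_ifs <;> rfl
  rw [hfun, PySem.List.foldl_append_singleton_eq_map, PySem.List.pyRange_zero_natCast]
  simp [List.map_map, Function.comp_def]

theorem pvStep_length (mask1 : List Bool) (n : Nat) (acc : List Bool) (j : Nat) :
    (pvStep mask1 n acc j).length = acc.length := by
  unfold pvStep
  split_ifs <;> simp

theorem pvFold_length (mask1 : List Bool) (n : Nat) :
    ∀ (l : List Nat) (acc : List Bool), (l.foldl (pvStep mask1 n) acc).length = acc.length := by
  intro l
  induction l with
  | nil => intro acc; rfl
  | cons j l ih => intro acc; rw [List.foldl_cons, ih, pvStep_length]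

theorem pvStep_getElem? (mask1 : List Bool) (n : Nat) (acc : List Bool) (j i : Nat)
    (hn : acc.length = n) (hi : i < n) :
    (pvStep mask1 n acc j)[i]? =
      if mask1.getD j true = false ∧ (j = i + 1 ∨ j = i ∨ i = j + 1) then some false
      else acc[i]? := by
  unfold pvStep
  by_cases hbad : mask1.getD j true = false
  · by_cases hnear : j = i + 1 ∨ j = i ∨ i = j + 1
    · conv_rhs => rw [if_pos ⟨hbad, hnear⟩]
      rw [if_pos hbad]
      split_ifs <;>
        simp only [List.getElem?_set, List.length_set, hn] <;>
        split_ifs <;> first | rfl | (exfalso; omega)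
    · conv_rhs => rw [if_neg (fun hh => hnear hh.2)]
      rw [if_pos hbad]
      split_ifs <;>
        simp only [List.getElem?_set, List.length_set, hn] <;>
        split_ifs <;> first | rfl | (exfalso; omega)
  · rw [if_neg hbad, if_neg (fun hh => hbad hh.1)]

theorem pvFold_getElem? (mask1 : List Bool) (n : Nat) :
    ∀ (l : List Nat) (acc : List Bool), acc.length = n → ∀ i, i < n →
    (l.foldl (pvStep mask1 n) acc)[i]? =
      if ∃ j ∈ l, mask1.getD j true = false ∧ (j = i + 1 ∨ j = i ∨ i = j + 1) then some false
      else acc[i]? := by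
  intro l
  induction l with
  | nil => intro acc _ i _; simp
  | cons j l ih =>
    intro acc hn i hi
    rw [List.foldl_cons, ih _ (by rw [pvStep_length]; exact hn) i hi]
    by_cases ht : ∃ j' ∈ l, mask1.getD j' true = false ∧ (j' = i + 1 ∨ j' = i ∨ i = j' + 1)
    · rw [if_pos ht, if_pos]
      obtain ⟨j', hm, h⟩ := ht
      exact ⟨j', List.mem_cons_of_mem _ hm, h⟩
    · rw [if_neg ht, pvStep_getElem? mask1 n acc j i hn hi]
      by_cases hc : mask1.getD j true = false ∧ (j = i + 1 ∨ j = i ∨ i = j + 1)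
      · rw [if_pos hc, if_pos ⟨j, List.mem_cons_self, hc⟩]
      · rw [if_neg hc, if_neg]
        rintro ⟨j', hm, h⟩
        rcases List.mem_cons.mp hm with rfl | hm'
        · exact hc h
        · exact ht ⟨j', hm', h⟩

theorem extend_mask_spec' (mask1 : List Bool) :
    extend_mask mask1 = extend_mask_alt mask1 := by
  rw [extend_mask_eq_map]
  unfold extend_mask_alt
  by_cases h0 : mask1.length = 0
  · simp [h0]
  · simp only [if_neg h0]
    set n := mask1.length with hn
    apply List.ext_getElem?
    intro i
    by_cases hi : i < n
    · rw [List.getElem?_eq_getElem (by simpa using hi), List.getElem_map, List.getElem_range]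
      simp only [List.getElem?_set, List.length_set, pvFold_length, List.length_replicate]
      by_cases hlast : i = n - 1
      · rw [if_pos hlast.symm, if_pos (show n - 1 < n by omega)]
        have hg : pvG mask1 ((i : Nat) : Int) = true := by
          unfold pvG; rw [if_pos]; right; omega
        rw [hg]
      · rw [if_neg (show ¬ n - 1 = i by omega)]
        by_cases hz : i = 0
        · rw [if_pos hz.symm, if_pos (show (0:Nat) < n by omega)]
          have hg : pvG mask1 ((i : Nat) : Int) = true := by
            unfold pvG; rw [if_pos]; left; omega
          rw [hg]
        · rw [if_neg (show ¬ (0:Nat) = i by omega)]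
          rw [pvFold_getElem? mask1 n _ _ (by simp) i hi]
          have h1 : 1 ≤ i := by omega
          have h2 : i + 1 < n := by omega
          have e1 : ((i : Nat) : Int) - 1 = (((i - 1 : Nat)) : Int) := by omega
          have e2 : ((i : Nat) : Int) + 1 = (((i + 1 : Nat)) : Int) := by push_cast; ring
          have hget : ∀ j, j < n → (mask1.getD j true = false ↔ PySem.List.pyGet? mask1 ((j : Nat) : Int) = some false) := by
            intro j hj
            rw [PySem.List.pyGet?_natCast, List.getD, List.getElem?_eq_getElem (by omega : j < mask1.length)]
            simp
          have hcond : (∃ j ∈ List.range n, mask1.getD j true = false ∧ (j = i + 1 ∨ j = i ∨ i = j + 1)) ↔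
              (mask1.getD (i-1) true = false ∨ mask1.getD i true = false ∨ mask1.getD (i+1) true = false) := by
            constructor
            · rintro ⟨j, hm, hb, (rfl | rfl | hj)⟩
              · right; right; exact hb
              · right; left; exact hb
              · left
                have hji : j = i - 1 := by omega
                rwa [← hji]
            · rintro (hb | hb | hb)
              · exact ⟨i - 1, List.mem_range.mpr (by omega), hb, by omega⟩
              · exact ⟨i, List.mem_range.mpr (by omega), hb, by omega⟩
              · exact ⟨i + 1, List.mem_range.mpr (by omega), hb, by omega⟩
          by_cases hc : ∃ j ∈ List.range n, mask1.getD j true = false ∧ (j = i + 1 ∨ j = i ∨ i = j + 1)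
          · rw [if_pos hc]
            have hd := hcond.mp hc
            have hg : pvG mask1 ((i : Nat) : Int) = false := by
              unfold pvG
              rw [if_neg (by rintro (hh | hh) <;> omega)]
              simp only [e1, e2]
              split_ifs with c1 c2 c3
              · rfl
              · rfl
              · rfl
              · rcases hd with hb | hb | hb
                · exact absurd ((hget (i-1) (by omega)).mp hb) c1
                · exact absurd ((hget i (by omega)).mp hb) c3
                · exact absurd ((hget (i+1) (by omega)).mp hb) c2
            rw [hg]
          · rw [if_neg hc]
            have hd := fun hh => hc (hcond.mpr hh)
            have hg : pvG mask1 ((i : Nat) : Int) = true := by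
              unfold pvG
              rw [if_neg (by rintro (hh | hh) <;> omega)]
              simp only [e1, e2]
              split_ifs with c1 c2 c3
              · exact absurd (Or.inl ((hget (i-1) (by omega)).mpr c1)) hd
              · exact absurd (Or.inr (Or.inr ((hget (i+1) (by omega)).mpr c2))) hd
              · exact absurd (Or.inr (Or.inl ((hget i (by omega)).mpr c3))) hd
              · rfl
            rw [hg, List.getElem?_eq_getElem (by simpa using hi), List.getElem_replicate]
    · rw [List.getElem?_eq_none (by simpa using hi),
          List.getElem?_eq_none (by simp only [List.length_set, pvFold_length, List.length_replicate]; omega)]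

-- ===== VERDICT (by name: the statement is the Claim_ definition above) =====
theorem extend_mask_spec : Claim_equal_extend_mask := by
  intro mask1 _
  exact extend_mask_spec' mask1
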